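-- pv_equiv track=rewrite | github.com/MrRoolade/Epreuve_Air | Air06.py | delete_if_condition
-- ===== SOURCE A (Python) =====
-- def delete_if_condition(u_value, u_operator):
--     new_array = []
--     for value in u_value :
--         check = 0
--         for char in value:
--             if char in u_operator:
--                 check = 1
--                 break
--         if check != 1:
--             new_array.append(value)
--     return new_array
-- ===== SOURCE B (Python) =====
-- def delete_if_condition(u_value, u_operator):
--     # Delete-and-compare: strip every forbidden character from the value with a
--     # translation table built once; the value is clean iff nothing was deleted.
--     table = str.maketrans('', '', u_operator)
--     return [v for v in u_value if len(v.translate(table)) == len(v)]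
-- ===== Notes on version B (the rewrite author's own statement) =====
-- stated objective: alternative
-- what changed: Replaces the per-character flag-and-break scan against u_operator with a delete-and-compare pass: a translation table deleting all forbidden characters is built once and a value is kept iff translating it deletes nothing (length unchanged).
import Mathlib
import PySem

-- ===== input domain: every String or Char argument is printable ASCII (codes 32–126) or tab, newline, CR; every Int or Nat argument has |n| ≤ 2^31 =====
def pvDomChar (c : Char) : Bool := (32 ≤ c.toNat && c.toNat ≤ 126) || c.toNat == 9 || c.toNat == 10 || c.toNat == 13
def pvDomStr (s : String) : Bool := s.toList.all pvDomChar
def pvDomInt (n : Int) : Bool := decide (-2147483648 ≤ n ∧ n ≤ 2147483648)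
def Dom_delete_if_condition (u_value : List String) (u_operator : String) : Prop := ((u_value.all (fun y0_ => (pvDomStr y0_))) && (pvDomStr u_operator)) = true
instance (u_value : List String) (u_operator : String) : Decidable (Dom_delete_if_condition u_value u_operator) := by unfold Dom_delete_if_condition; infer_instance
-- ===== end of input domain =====

-- B builds a deletion table from u_operator once and keeps a value iff deleting all
-- forbidden characters leaves its length unchanged (alternative decomposition; return
-- value only, no mutation).

-- ===== PORT A =====
-- inner 'for char in value: if char in u_operator: check = 1; break' — returns the final check
def pvCheckA (op : List Char) : List Char → Nat
  | [] => 0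
  | c :: rest => if op.contains c then 1 else pvCheckA op rest

def delete_if_condition (u_value : List String) (u_operator : String) : List String :=
  u_value.foldl (fun new_array value =>
    let check := pvCheckA u_operator.toList value.toList
    if check ≠ 1 then new_array ++ [value] else new_array) []

-- ===== PORT B =====
-- 'v.translate(table)' with a delete-everything table = drop the chars of u_operator;
-- keep v iff the translated length equals the original length
def delete_if_condition_alt (u_value : List String) (u_operator : String) : List String :=
  let table : List Char := u_operator.toList
  u_value.filter (fun v =>
    decide ((v.toList.filter (fun c => !table.contains c)).length = v.toList.length))

-- ===== PRECONDITION & SPEC =====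
def Spec_delete_if_condition (u_value : List String) (u_operator : String) (out : List String) : Prop := out = delete_if_condition_alt u_value u_operator
instance (u_value : List String) (u_operator : String) (out : List String) : Decidable (Spec_delete_if_condition u_value u_operator out) := by unfold Spec_delete_if_condition; infer_instance

-- ===== CLAIM (what is proved, stated in full; the proofs are below) =====
def Claim_equal_delete_if_condition : Prop := ∀ (u_value : List String) (u_operator : String), Dom_delete_if_condition u_value u_operator → Spec_delete_if_condition u_value u_operator (delete_if_condition u_value u_operator)

-- ===== LEMMAS AND PROOFS =====

-- A's inner scan returns 1 exactly when some char of the value is forbidden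
theorem pvCheckA_eq_one_iff (op : List Char) (l : List Char) :
    pvCheckA op l = 1 ↔ ∃ c ∈ l, c ∈ op := by
  induction l with
  | nil => simp [pvCheckA]
  | cons c rest ih =>
    simp only [pvCheckA]
    by_cases h : op.contains c
    · simp [List.contains_iff_mem.mp h]
    · simp only [if_neg h, ih, List.mem_cons]
      constructor
      · rintro ⟨d, hd, hdo⟩; exact ⟨d, Or.inr hd, hdo⟩
      · rintro ⟨d, hd | hd, hdo⟩
        · subst hd; exact absurd (List.contains_iff_mem.mpr hdo) h
        · exact ⟨d, hd, hdo⟩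

-- A's append-fold is the filter on A's own keep-predicate
theorem foldl_keep (op : List Char) (vs : List String) (acc : List String) :
    vs.foldl (fun new_array value =>
      if pvCheckA op value.toList ≠ 1 then new_array ++ [value] else new_array) acc =
    acc ++ vs.filter (fun value => decide (¬ pvCheckA op value.toList = 1)) := by
  induction vs generalizing acc with
  | nil => simp
  | cons v rest ih =>
    by_cases h : pvCheckA op v.toList = 1
    · have hb : (decide (¬ pvCheckA op v.toList = 1)) = false := by simp [h]
      rw [List.foldl_cons, if_neg (not_not_intro h), ih, List.filter_cons, hb, if_neg (by simp)]
    · have hb : (decide (¬ pvCheckA op v.toList = 1)) = true := by simp [h]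
      rw [List.foldl_cons, if_pos h, ih, List.filter_cons, hb, if_pos rfl, List.append_assoc,
        List.singleton_append]

-- the two keep-predicates agree: nothing deleted iff no char of v is forbidden
theorem keep_pred_eq (op : List Char) (v : String) :
    (decide (¬ pvCheckA op v.toList = 1))
      = decide ((v.toList.filter (fun c => !op.contains c)).length = v.toList.length) := by
  have hiff : (¬ pvCheckA op v.toList = 1) ↔
      ((v.toList.filter (fun c => !op.contains c)).length = v.toList.length) := by
    rw [pvCheckA_eq_one_iff, List.length_filter_eq_length_iff]
    simp
  exact decide_eq_decide.mpr hiff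

-- ===== VERDICT (by name: the statement is the Claim_ definition above) =====
theorem delete_if_condition_spec : Claim_equal_delete_if_condition := by
  intro u_value u_operator _
  show delete_if_condition u_value u_operator = delete_if_condition_alt u_value u_operator
  rw [delete_if_condition, delete_if_condition_alt, foldl_keep, List.nil_append]
  exact List.filter_congr (fun v _ => keep_pred_eq u_operator.toList v)
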